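-- pv_equiv track=rewrite | github.com/ThalesSilva19/PUDIM | leitura.py | separaPalavras
-- ===== SOURCE A (Python) =====
-- def letraOuNumero(c):
-- 	return ('A' <= c and c <= 'Z') or ('a' <= c and c <= 'z') or ('0' <= c and c <= '9') or (c == '_')
--
-- def duplos(c):
-- 	return c in ['erro','=','!','>','<']
--
-- def especiais(c):
-- 	return c in ['+','-','*','/','(',')','%',':','[',']']
--
-- def separaPalavras(linha):
--
-- 	palavras = []
-- 	palavra = ""
-- 	duplo = False
--
-- 	for c in linha:
--
-- 		if duplo:
-- 			duplo = False
-- 			if c == '=':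
-- 				palavra += c
-- 				palavras.append(palavra)
-- 				palavra = ""
-- 				continue
-- 			else:
-- 				palavras.append(palavra)
-- 				palavra = ""
--
-- 		if c == ' ':
-- 			if palavra != "":
-- 				palavras.append(palavra)
-- 				palavra = ""
--
-- 		elif letraOuNumero(c):
-- 			palavra += c
--
-- 		elif especiais(c):
-- 			if palavra != "":
-- 				palavras.append(palavra)
-- 				palavra = ""
-- 			palavras.append(c)
--
-- 		elif duplos(c):
-- 			duplo = True
-- 			if palavra != "":
-- 				palavras.append(palavra)
-- 				palavra = ""
-- 			palavra += c
--
-- 		elif c == '#':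
-- 			return palavras
--
-- 	if palavra != "":
-- 		palavras.append(palavra)
--
-- 	return palavras
-- ===== SOURCE B (Python) =====
-- def separaPalavras(linha):
--     palavras = []
--     palavra = []
--     n = len(linha)
--     i = 0
--     while i < n:
--         c = linha[i]
--         if c == ' ':
--             if palavra:
--                 palavras.append("".join(palavra))
--                 palavra = []
--             i += 1
--         elif ('A' <= c <= 'Z') or ('a' <= c <= 'z') or ('0' <= c <= '9') or c == '_':
--             palavra.append(c)
--             i += 1
--         elif c in '+-*/()%:[]':
--             if palavra:
--                 palavras.append("".join(palavra))
--                 palavra = []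
--             palavras.append(c)
--             i += 1
--         elif c in '=!><':
--             if palavra:
--                 palavras.append("".join(palavra))
--                 palavra = []
--             if i + 1 < n and linha[i + 1] == '=':
--                 palavras.append(c + '=')
--                 i += 2
--             else:
--                 palavras.append(c)
--                 i += 1
--         elif c == '#':
--             return palavras
--         else:
--             i += 1
--     if palavra:
--         palavras.append("".join(palavra))
--     return palavras
-- ===== Notes on version B (the rewrite author's own statement) =====
-- stated objective: alternative
-- what changed: Replaces the carried one-iteration-delay flag (which re-processes the next character) with an index-based scan that peeks one character ahead at each operator character and emits the one- or two-character token immediately, advancing the index by one or two.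
import Mathlib
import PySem

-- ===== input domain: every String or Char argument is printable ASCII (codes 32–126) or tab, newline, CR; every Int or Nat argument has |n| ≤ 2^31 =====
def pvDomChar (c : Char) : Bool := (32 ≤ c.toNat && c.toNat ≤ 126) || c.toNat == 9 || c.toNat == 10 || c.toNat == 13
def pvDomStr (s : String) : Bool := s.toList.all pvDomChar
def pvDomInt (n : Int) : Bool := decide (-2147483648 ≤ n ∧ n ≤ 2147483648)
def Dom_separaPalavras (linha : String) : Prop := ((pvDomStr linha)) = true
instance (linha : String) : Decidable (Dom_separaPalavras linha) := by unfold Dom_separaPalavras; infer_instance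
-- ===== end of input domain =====

-- B replaces A's carried delay flag (with next-iteration reprocessing) by an index-based
-- scan that peeks one character ahead at each operator character and emits the whole
-- operator token at once; same cost, alternative decomposition.

-- ===== PORT A =====
def letraOuNumero (c : Char) : Bool :=
  (('A' ≤ c && c ≤ 'Z') || ('a' ≤ c && c ≤ 'z') || ('0' ≤ c && c ≤ '9') || (c == '_'))

-- `c in ['erro','=','!','>','<']`: c is a single character, so 'erro' can never match
def duplosA (c : Char) : Bool := c == '=' || c == '!' || c == '>' || c == '<'

def especiaisA (c : Char) : Bool :=
  ['+', '-', '*', '/', '(', ')', '%', ':', '[', ']'].contains c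

-- the for-loop of A, state = (palavras, palavra, duplo); early `return` on '#'
def sepA : List Char → List String → List Char → Bool → List String
  | [], palavras, palavra, _ =>
      if palavra ≠ [] then palavras ++ [String.ofList palavra] else palavras
  | c :: rest, palavras, palavra, duplo =>
      if duplo && c == '=' then
        sepA rest (palavras ++ [String.ofList (palavra ++ [c])]) [] false
      else
        let palavras := if duplo then palavras ++ [String.ofList palavra] else palavras
        let palavra := if duplo then ([] : List Char) else palavra
        if c == ' ' then
          sepA rest (if palavra ≠ [] then palavras ++ [String.ofList palavra] else palavras) [] false
        else if letraOuNumero c then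
          sepA rest palavras (palavra ++ [c]) false
        else if especiaisA c then
          sepA rest ((if palavra ≠ [] then palavras ++ [String.ofList palavra] else palavras)
                      ++ [String.ofList [c]]) [] false
        else if duplosA c then
          sepA rest (if palavra ≠ [] then palavras ++ [String.ofList palavra] else palavras) [c] true
        else if c == '#' then
          palavras
        else
          sepA rest palavras palavra false

def separaPalavras (linha : String) : List String :=
  sepA linha.toList [] [] false

-- ===== PORT B =====
-- B's index-based while loop, written over the remaining suffix cs = linha[i:]:
-- head? inspects linha[i+1] (the one-char lookahead at an operator), tail advances i by 2
def sepB (cs : List Char) (palavras : List String) (palavra : List Char) : List String :=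
  match cs with
  | [] => if palavra ≠ [] then palavras ++ [String.ofList palavra] else palavras
  | c :: cs =>
      if c == ' ' then
        sepB cs (if palavra ≠ [] then palavras ++ [String.ofList palavra] else palavras) []
      else if letraOuNumero c then
        sepB cs palavras (palavra ++ [c])
      else if especiaisA c then
        sepB cs ((if palavra ≠ [] then palavras ++ [String.ofList palavra] else palavras)
                  ++ [String.ofList [c]]) []
      else if duplosA c then
        let palavras := if palavra ≠ [] then palavras ++ [String.ofList palavra] else palavras
        if cs.head? == some '=' then
          sepB cs.tail (palavras ++ [String.ofList [c, '=']]) []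
        else
          sepB cs (palavras ++ [String.ofList [c]]) []
      else if c == '#' then
        palavras
      else
        sepB cs palavras palavra
  termination_by cs.length
  decreasing_by
  all_goals simp [List.length_tail]

def separaPalavras_alt (linha : String) : List String :=
  sepB linha.toList [] []

-- ===== PRECONDITION & SPEC =====
def Spec_separaPalavras (linha : String) (out : List String) : Prop := out = separaPalavras_alt linha
instance (linha : String) (out : List String) : Decidable (Spec_separaPalavras linha out) := by unfold Spec_separaPalavras; infer_instance

-- ===== CLAIM (what is proved, stated in full; the proofs are below) =====
def Claim_equal_separaPalavras : Prop := ∀ (linha : String), Dom_separaPalavras linha → Spec_separaPalavras linha (separaPalavras linha)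

-- ===== LEMMAS AND PROOFS =====

-- After an operator, A with the flag set on a head that is not an equals sign first flushes the operator
-- and then processes the head with an empty word: same as restarting with duplo=false.
theorem sepA_true_step (d : Char) (rest : List Char) (ps : List String) (w : List Char)
    (hd : d ≠ '=') :
    sepA (d :: rest) ps w true = sepA (d :: rest) (ps ++ [String.ofList w]) [] false := by
  simp [sepA, hd]

theorem sepA_eq_sepB (n : Nat) :
    ∀ cs : List Char, cs.length ≤ n → ∀ ps w, sepA cs ps w false = sepB cs ps w := by
  induction n with
  | zero =>
      intro cs h ps w
      have : cs = [] := List.eq_nil_of_length_eq_zero (Nat.le_zero.mp h)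
      subst this; simp [sepA, sepB]
  | succ n ih =>
      intro cs h ps w
      match cs with
      | [] => simp [sepA, sepB]
      | c :: rest =>
        have hr : rest.length ≤ n := by simpa using Nat.succ_le_succ_iff.mp h
        by_cases hsp : c = ' '
        · simp [sepA, sepB, hsp, ih rest hr]
        · by_cases hln : letraOuNumero c = true
          · simp [sepA, sepB, hsp, hln, ih rest hr]
          · by_cases hes : especiaisA c = true
            · simp [sepA, sepB, hsp, hln, hes, ih rest hr]
            · by_cases hdp : duplosA c = true
              · have hA : sepA (c :: rest) ps w false =
                    sepA rest (if w = [] then ps else ps ++ [String.ofList w]) [c] true := by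
                  simp [sepA, hsp, hln, hes, hdp]
                rw [hA]
                match rest, hr with
                | [], _ =>
                    simp [sepA, sepB, hsp, hln, hes, hdp]
                | '=' :: rest', hr =>
                    have hr' : rest'.length ≤ n := Nat.le_of_succ_le hr
                    simp [sepA, sepB, hsp, hln, hes, hdp, ih rest' hr']
                | d :: rest', hr =>
                    by_cases hde : d = '='
                    · subst hde
                      have hr' : rest'.length ≤ n := Nat.le_of_succ_le hr
                      simp [sepA, sepB, hsp, hln, hes, hdp, ih rest' hr']
                    · rw [sepA_true_step d rest' _ [c] hde,
                        ih (d :: rest') hr]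
                      simp [sepB, hsp, hln, hes, hdp, hde]
              · by_cases hhs : c = '#'
                · subst hhs; simp [sepA, sepB, letraOuNumero, especiaisA, duplosA]
                · simp [sepA, sepB, hsp, hln, hes, hdp, hhs, ih rest hr]

-- ===== VERDICT (by name: the statement is the Claim_ definition above) =====
theorem separaPalavras_spec : Claim_equal_separaPalavras := by
  intro linha _
  unfold Spec_separaPalavras separaPalavras separaPalavras_alt
  exact sepA_eq_sepB linha.toList.length linha.toList (le_refl _) [] []
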